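-- pv_equiv track=rewrite | github.com/haiibarose/ComProgGrader | P2_01_Func1.py | zip_odds
-- ===== SOURCE A (Python) =====
-- def is_odd(n):
--     return n % 2 == 1
--
-- def get_odds(x):
--     ans = list()
--     for i in x:
--         if is_odd(i):
--             ans.append(i)
--     return ans
--
-- def zip_odds(a, b):
--     odd_a = get_odds(a)
--     odd_b = get_odds(b)
--     ans = list()
--     for i in range(max(len(odd_a), len(odd_b))):
--         if i < len(odd_a):
--             ans.append(odd_a[i])
--         if i < len(odd_b):
--             ans.append(odd_b[i])
--     return ans
-- ===== SOURCE B (Python) =====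
-- def zip_odds(a, b):
--     ans = []
--     cur, ci = a, 0
--     oth, oi = b, 0
--     exhausted = 0
--     while exhausted < 2:
--         while ci < len(cur) and cur[ci] % 2 != 1:
--             ci += 1
--         if ci < len(cur):
--             ans.append(cur[ci])
--             ci += 1
--             exhausted = 0
--         else:
--             exhausted += 1
--         cur, ci, oth, oi = oth, oi, cur, ci
--     return ans
-- ===== Notes on version B (the rewrite author's own statement) =====
-- stated objective: alternative
-- what changed: B drops the two filtering passes entirely: a single loop walks the two lists with a pair of cursors that are swapped after every step, emitting the next odd element of the current list and stopping after both cursors hit the end back-to-back (an exhaustion counter), instead of A's build-two-filtered-lists-then-index-weave.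
import Mathlib
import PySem

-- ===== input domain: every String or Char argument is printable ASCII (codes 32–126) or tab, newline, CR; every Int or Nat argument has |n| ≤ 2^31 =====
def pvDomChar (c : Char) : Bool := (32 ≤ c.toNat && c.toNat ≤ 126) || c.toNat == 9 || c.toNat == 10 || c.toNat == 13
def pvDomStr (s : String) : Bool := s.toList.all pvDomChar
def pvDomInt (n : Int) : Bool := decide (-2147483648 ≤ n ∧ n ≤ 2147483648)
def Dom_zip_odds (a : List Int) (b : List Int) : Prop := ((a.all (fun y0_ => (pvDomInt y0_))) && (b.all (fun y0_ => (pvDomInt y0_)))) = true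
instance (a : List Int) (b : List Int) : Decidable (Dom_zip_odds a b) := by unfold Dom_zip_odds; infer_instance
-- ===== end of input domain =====

-- B replaces A's filter-then-index-weave by one alternating-cursor scan over the two
-- lists with an exhaustion counter, never building the filtered lists (objective: alternative).


-- ===== PORT A =====
def is_odd (n : Int) : Bool := PySem.Int.mod n 2 == 1

def get_odds (x : List Int) : List Int :=
  x.foldl (fun ans i => if is_odd i then ans ++ [i] else ans) []

def zip_odds (a : List Int) (b : List Int) : List Int :=
  let odd_a := get_odds a
  let odd_b := get_odds b
  (PySem.List.pyRange 0 (max (odd_a.length : Int) (odd_b.length : Int)) 1).foldl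
    (fun ans i =>
      let ans := if i < (odd_a.length : Int) then ans ++ [PySem.List.pyGetD odd_a i 0] else ans
      if i < (odd_b.length : Int) then ans ++ [PySem.List.pyGetD odd_b i 0] else ans) []

-- ===== PORT B =====
-- Source B's inner while: advance ci over cur while the element is not odd.
def skipB (cur : List Int) (ci : Nat) : Nat :=
  if h : ci < cur.length then
    if PySem.Int.mod cur[ci] 2 == 1 then ci else skipB cur (ci + 1)
  else ci
termination_by cur.length - ci

theorem skipB_ge (cur : List Int) (ci : Nat) : ci ≤ skipB cur ci := by
  fun_induction skipB cur ci with
  | case1 ci h hodd => exact Nat.le_refl ci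
  | case2 ci h hodd ih => omega
  | case3 ci h => exact Nat.le_refl ci

-- Source B's outer while loop: state (ans, cur, ci, oth, oi, exhausted), cursors swapped each round.
def loopB (ans : List Int) (cur : List Int) (ci : Nat) (oth : List Int) (oi : Nat)
    (ex : Nat) : List Int :=
  if 2 ≤ ex then ans
  else
    if h : skipB cur ci < cur.length then
      loopB (ans ++ [cur[skipB cur ci]]) oth oi cur (skipB cur ci + 1) 0
    else
      loopB ans oth oi cur (skipB cur ci) (ex + 1)
termination_by ((cur.length - ci) + (oth.length - oi), 2 - ex)
decreasing_by
  · have := skipB_ge cur ci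
    exact Prod.Lex.left _ _ (by omega)
  · have := skipB_ge cur ci
    by_cases hlt : (oth.length - oi) + (cur.length - skipB cur ci)
        < (cur.length - ci) + (oth.length - oi)
    · exact Prod.Lex.left _ _ hlt
    · have heq : (oth.length - oi) + (cur.length - skipB cur ci)
          = (cur.length - ci) + (oth.length - oi) := by omega
      rw [heq]
      exact Prod.Lex.right _ (by omega)

def zip_odds_alt (a : List Int) (b : List Int) : List Int :=
  loopB [] a 0 b 0 0

-- ===== PRECONDITION & SPEC =====
def Spec_zip_odds (a : List Int) (b : List Int) (out : List Int) : Prop := out = zip_odds_alt a b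
instance (a : List Int) (b : List Int) (out : List Int) : Decidable (Spec_zip_odds a b out) := by unfold Spec_zip_odds; infer_instance

-- ===== CLAIM (what is proved, stated in full; the proofs are below) =====
def Claim_equal_zip_odds : Prop := ∀ (a : List Int) (b : List Int), Dom_zip_odds a b → Spec_zip_odds a b (zip_odds a b)

-- ===== LEMMAS AND PROOFS =====

-- the common interleaving of two (already filtered) lists, proof-side only
def weave (xs ys : List Int) : List Int :=
  (xs.zip ys).flatMap (fun p => [p.1, p.2]) ++ xs.drop (min xs.length ys.length) ++ ys.drop (min xs.length ys.length)

-- proof-side view of A's loop, with a Nat index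
def stepA (xs ys : List Int) (ans : List Int) (k : Nat) : List Int :=
  let ans := if k < xs.length then ans ++ [xs.getD k 0] else ans
  if k < ys.length then ans ++ [ys.getD k 0] else ans

theorem weave_nil_left (ys : List Int) : weave [] ys = ys := by simp [weave]

theorem weave_nil_right (xs : List Int) : weave xs [] = xs := by simp [weave]

theorem weave_cons_cons (x y : Int) (xs ys : List Int) :
    weave (x :: xs) (y :: ys) = x :: y :: weave xs ys := by
  simp [weave, Nat.succ_min_succ]

theorem weave_swap (x : Int) (xs ys : List Int) :
    weave (x :: xs) ys = x :: weave ys xs := by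
  induction ys generalizing x xs with
  | nil => rw [weave_nil_right, weave_nil_left]
  | cons y ys ih =>
      rw [weave_cons_cons]
      cases xs with
      | nil => rw [weave_nil_left, weave_nil_right]
      | cons x' xs' => rw [ih, weave_cons_cons]

theorem getD_map_range_self (xs : List Int) :
    (List.range xs.length).map (fun k => xs.getD k 0) = xs := by
  apply List.ext_getElem
  · simp
  · intro i h1 h2
    simp [List.getElem?_eq_getElem h2]

theorem foldl_stepA (xs ys acc : List Int) :
    (List.range (max xs.length ys.length)).foldl (stepA xs ys) acc = acc ++ weave xs ys := by
  induction xs generalizing ys acc with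
  | nil =>
      rw [weave_nil_left]
      simp only [List.length_nil, Nat.max_eq_right (Nat.zero_le _)]
      have : (List.range ys.length).foldl (stepA [] ys) acc
          = (List.range ys.length).foldl (fun ans k => ans ++ [ys.getD k 0]) acc := by
        apply PySem.List.foldl_congr_mem
        intro ans k hk
        simp only [List.mem_range] at hk
        simp [stepA, hk]
      rw [this, PySem.List.foldl_append_singleton_eq_map, getD_map_range_self]
  | cons x xs ih =>
      cases ys with
      | nil =>
          rw [weave_nil_right]
          simp only [List.length_nil, Nat.max_eq_left (Nat.zero_le _)]
          have : (List.range (x :: xs).length).foldl (stepA (x :: xs) []) acc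
              = (List.range (x :: xs).length).foldl (fun ans k => ans ++ [(x :: xs).getD k 0]) acc := by
            apply PySem.List.foldl_congr_mem
            intro ans k hk
            simp only [List.mem_range] at hk
            simp [stepA, Nat.le_of_lt_succ hk]
          rw [this, PySem.List.foldl_append_singleton_eq_map, getD_map_range_self]
      | cons y ys =>
          rw [weave_cons_cons]
          have hmax : max (x :: xs).length (y :: ys).length = max xs.length ys.length + 1 := by
            simp [Nat.succ_max_succ]
          rw [hmax, List.range_succ_eq_map, List.foldl_cons, List.foldl_map]
          have hstep : ∀ (ans : List Int) (k : Nat),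
              stepA (x :: xs) (y :: ys) ans (Nat.succ k) = stepA xs ys ans k := by
            intro ans k
            simp [stepA]
          have h0 : stepA (x :: xs) (y :: ys) acc 0 = acc ++ [x, y] := by
            simp [stepA]
          calc (List.range (max xs.length ys.length)).foldl
                  (fun ans k => stepA (x :: xs) (y :: ys) ans (Nat.succ k))
                  (stepA (x :: xs) (y :: ys) acc 0)
              = (List.range (max xs.length ys.length)).foldl (stepA xs ys) (acc ++ [x, y]) := by
                rw [h0]
                apply PySem.List.foldl_congr_mem
                intro ans k _
                exact hstep ans k
            _ = acc ++ [x, y] ++ weave xs ys := ih _ _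
            _ = acc ++ (x :: y :: weave xs ys) := by simp

theorem get_odds_eq_filter (x : List Int) :
    get_odds x = x.filter (fun v => PySem.Int.mod v 2 == 1) := by
  unfold get_odds
  rw [PySem.List.foldl_append_if_eq_filter]
  rfl

theorem pyRange_zero_cast (n : Nat) :
    PySem.List.pyRange 0 ((n : Int)) 1 = (List.range n).map (fun (k : Nat) => (k : Int)) := by
  rw [PySem.List.pyRange_one, List.map_eq_flatMap]
  simp [List.map_eq_flatMap]

theorem foldl_pyRange_cast (n : Nat) (F : List Int → Int → List Int) (init : List Int) :
    (PySem.List.pyRange 0 ((n : Int)) 1).foldl F init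
      = (List.range n).foldl (fun (acc : List Int) (k : Nat) => F acc (k : Int)) init := by
  rw [pyRange_zero_cast, List.foldl_map]

theorem zip_odds_eq_weave (xs ys : List Int) :
    (PySem.List.pyRange 0 (max (xs.length : Int) (ys.length : Int)) 1).foldl
      (fun ans i =>
        let ans := if i < (xs.length : Int) then ans ++ [PySem.List.pyGetD xs i 0] else ans
        if i < (ys.length : Int) then ans ++ [PySem.List.pyGetD ys i 0] else ans) []
    = weave xs ys := by
  have hcast : (max (xs.length : Int) (ys.length : Int)) = ((max xs.length ys.length : Nat) : Int) := by
    simp [Nat.cast_max]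
  rw [hcast, foldl_pyRange_cast]
  have h := PySem.List.foldl_congr_mem (List.range (max xs.length ys.length))
    (fun (acc : List Int) (k : Nat) =>
      (fun ans (i : Int) =>
        let ans := if i < (xs.length : Int) then ans ++ [PySem.List.pyGetD xs i 0] else ans
        if i < (ys.length : Int) then ans ++ [PySem.List.pyGetD ys i 0] else ans) acc (k : Int))
    (stepA xs ys) []
    (by
      intro acc k _
      simp [stepA, PySem.List.pyGetD_natCast])
  rw [h, foldl_stepA]
  simp

-- ---- B side ----

theorem skipB_le (cur : List Int) (ci : Nat) (h : ci ≤ cur.length) :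
    skipB cur ci ≤ cur.length := by
  fun_induction skipB cur ci with
  | case1 ci h' hodd => omega
  | case2 ci h' hodd ih => exact ih (by omega)
  | case3 ci h' => exact h


def oddp (v : Int) : Bool := PySem.Int.mod v 2 == 1

-- what remains to be produced from a loopB state
def Wfun (ex : Nat) (X Y : List Int) : List Int :=
  if 2 ≤ ex then [] else if ex = 1 ∧ X = [] then [] else weave X Y

theorem Wfun_emit (ex : Nat) (hex : ex < 2) (x : Int) (X Y : List Int) :
    Wfun ex (x :: X) Y = x :: Wfun 0 Y X := by
  unfold Wfun
  rw [if_neg (show ¬ 2 ≤ ex by omega), if_neg (show ¬ (ex = 1 ∧ (x :: X : List Int) = []) by simp),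
    if_neg (show ¬ (2:Nat) ≤ 0 by omega), if_neg (show ¬ ((0:Nat) = 1 ∧ Y = []) by simp)]
  exact weave_swap x X Y

theorem Wfun_exhaust (ex : Nat) (hex : ex < 2) (Y : List Int) :
    Wfun ex [] Y = Wfun (ex + 1) Y [] := by
  interval_cases ex
  · rcases eq_or_ne Y [] with h | h
    · subst h; simp [Wfun, weave]
    · simp only [Wfun]
      rw [if_neg (by omega), if_neg (by simp), if_neg (by omega), if_neg (by simp [h]),
        weave_nil_left, weave_nil_right]
  · simp [Wfun]

theorem skipB_filter (cur : List Int) (ci : Nat) :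
    (cur.drop ci).filter oddp = (cur.drop (skipB cur ci)).filter oddp := by
  fun_induction skipB cur ci with
  | case1 ci h hodd => rfl
  | case2 ci h hodd ih =>
      rw [← ih]
      have hf : oddp cur[ci] = false := Bool.eq_false_iff.mpr hodd
      rw [List.drop_eq_getElem_cons h, List.filter_cons, hf]
      simp
  | case3 ci h => rfl

theorem skipB_odd (cur : List Int) (ci : Nat) (h : skipB cur ci < cur.length) :
    oddp cur[skipB cur ci] = true := by
  fun_induction skipB cur ci with
  | case1 ci h' hodd => simpa [oddp] using hodd
  | case2 ci h' hodd ih => exact ih h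
  | case3 ci h' => omega

theorem loopB_eq (ans cur oth : List Int) (ci oi ex : Nat)
    (hci : ci ≤ cur.length) (hoi : oi ≤ oth.length) :
    loopB ans cur ci oth oi ex
      = ans ++ Wfun ex ((cur.drop ci).filter oddp) ((oth.drop oi).filter oddp) := by
  fun_induction loopB ans cur ci oth oi ex with
  | case1 ans cur ci oth oi ex hex =>
      simp [Wfun, hex]
  | case2 ans cur ci oth oi ex hex hk ih =>
      rw [ih hoi (by omega)]
      have hX : (cur.drop ci).filter oddp = cur[skipB cur ci] :: (cur.drop (skipB cur ci + 1)).filter oddp := by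
        rw [skipB_filter cur ci, List.drop_eq_getElem_cons hk, List.filter_cons,
          skipB_odd cur ci hk]
        simp
      rw [hX, Wfun_emit ex (by omega)]
      simp
  | case3 ans cur ci oth oi ex hex hk ih =>
      have hkk : skipB cur ci = cur.length := by
        have h1 := skipB_le cur ci hci
        have h2 : ¬ skipB cur ci < cur.length := hk
        omega
      rw [ih hoi (Nat.le_of_eq hkk)]
      have hX : (cur.drop ci).filter oddp = [] := by
        rw [skipB_filter cur ci, hkk]
        simp
      have hX2 : (cur.drop (skipB cur ci)).filter oddp = [] := by
        rw [hkk]; simp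
      rw [hX, hX2, Wfun_exhaust ex (by omega)]

-- ===== VERDICT (by name: the statement is the Claim_ definition above) =====
theorem zip_odds_spec : Claim_equal_zip_odds := by
  intro a b _
  unfold Spec_zip_odds zip_odds zip_odds_alt
  rw [get_odds_eq_filter, get_odds_eq_filter, zip_odds_eq_weave,
    loopB_eq [] a b 0 0 0 (by omega) (by omega)]
  simp only [List.drop_zero, List.nil_append, Wfun]
  rw [if_neg (by omega), if_neg (by simp)]
  rfl
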